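-- pv_equiv track=rewrite | github.com/Pritz69/GFG_POTD | Seating_Arrangement.py | is_possible_to_get_seats
-- ===== SOURCE A (Python) =====
-- from typing import List
--
-- def is_possible_to_get_seats(n : int, m : int, seats : List[int]) -> bool:
--     # code here
--     available_seats = 0
--     i = 0
--     while i < m:
--         prev = 0
--         if i == 0:
--             prev = 0
--         else:
--             prev = seats[i-1]
--         nxt = 0
--         if i == m-1:
--             nxt = 0
--         else:
--             nxt = seats[i+1]
--
--         if prev + nxt + seats[i] == 0:
--             available_seats += 1
--             i +=1
--         i += 1
--
--     return available_seats >= n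
-- ===== SOURCE B (Python) =====
-- from typing import List
--
-- def is_possible_to_get_seats(n : int, m : int, seats : List[int]) -> bool:
--     # Segment decomposition: mark each of the first m positions whose
--     # (boundary-padded) 3-window sums to 0, then add ceil(L/2) per maximal run.
--     s = seats[:max(m, 0)]
--     good = [a + b + c == 0 for a, b, c in zip([0] + s, s, s[1:] + [0])]
--     total = 0
--     run = 0
--     for g in good:
--         if g:
--             run += 1
--         else:
--             total += (run + 1) // 2
--             run = 0
--     total += (run + 1) // 2
--     return total >= n
-- ===== Notes on version B (the rewrite author's own statement) =====
-- stated objective: alternative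
-- what changed: Replaces A's index-skipping while loop (advance by 2 after each pick) by a one-pass window-marking of zero-sum triples followed by a per-run closed form ceil(L/2) summed over maximal runs.
import Mathlib
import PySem

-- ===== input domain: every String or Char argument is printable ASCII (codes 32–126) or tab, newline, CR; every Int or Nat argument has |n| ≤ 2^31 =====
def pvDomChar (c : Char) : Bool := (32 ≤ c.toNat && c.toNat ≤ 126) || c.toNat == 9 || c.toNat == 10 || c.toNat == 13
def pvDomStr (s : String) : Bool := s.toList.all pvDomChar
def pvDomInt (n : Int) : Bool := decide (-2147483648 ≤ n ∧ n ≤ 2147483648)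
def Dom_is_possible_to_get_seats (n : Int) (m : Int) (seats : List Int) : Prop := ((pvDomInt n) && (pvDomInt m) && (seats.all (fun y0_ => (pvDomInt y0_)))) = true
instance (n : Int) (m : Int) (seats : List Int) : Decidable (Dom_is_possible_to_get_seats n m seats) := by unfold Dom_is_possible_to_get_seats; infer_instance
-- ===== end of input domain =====

-- B replaces A's index-skipping while loop by a one-pass window-marking plus
-- per-run closed form ceil(L/2); alternative decomposition, same O(m) cost.

-- ===== PORT A =====
-- seats[i] with 0 ≤ i; default 0 is only reached outside Pre_ (where Python A raises IndexError)
def pvGetD (xs : List Int) (i : Int) : Int := PySem.List.pyGetD xs i 0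

-- A's while loop: i advances by 2 after a pick, else by 1
def aLoop (m : Int) (seats : List Int) (avail : Int) (i : Int) : Int :=
  if _h : i < m then
    let prev : Int := if i = 0 then 0 else pvGetD seats (i-1)
    let nxt : Int := if i = m-1 then 0 else pvGetD seats (i+1)
    if prev + nxt + pvGetD seats i = 0 then aLoop m seats (avail+1) (i+2)
    else aLoop m seats avail (i+1)
  else avail
termination_by (m - i).toNat
decreasing_by all_goals omega

def is_possible_to_get_seats (n : Int) (m : Int) (seats : List Int) : Bool :=
  decide (n ≤ aLoop m seats 0 0)

-- ===== PORT B =====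
-- good = [a+b+c == 0 for a,b,c in zip([0]+s, s, s[1:]+[0])]
def goodList (s : List Int) : List Bool :=
  List.zipWith3 (fun a b c => decide (a + b + c = 0)) (0 :: s) s (s.tail ++ [0])

-- the loop body over (total, run)
def bStep (tr : Int × Int) (g : Bool) : Int × Int :=
  match g with
  | true => (tr.1, tr.2 + 1)
  | false => (tr.1 + PySem.Int.floordiv (tr.2 + 1) 2, 0)

def is_possible_to_get_seats_alt (n : Int) (m : Int) (seats : List Int) : Bool :=
  let s := seats.take (max m 0).toNat   -- Python seats[:max(m,0)]; exact: bound is ≥ 0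
  let p := (goodList s).foldl bStep (0, 0)
  decide (n ≤ p.1 + PySem.Int.floordiv (p.2 + 1) 2)

-- ===== PRECONDITION & SPEC =====
-- Pre_ excludes exactly m > len(seats), on which Python A raises IndexError.
def Pre_is_possible_to_get_seats (n : Int) (m : Int) (seats : List Int) : Prop :=
  m ≤ (seats.length : Int)
instance (n : Int) (m : Int) (seats : List Int) : Decidable (Pre_is_possible_to_get_seats n m seats) := by unfold Pre_is_possible_to_get_seats; infer_instance

def pvWitness_is_possible_to_get_seats : Int × Int × List Int := (1, 4, [0, 0, 1, 0])

def Spec_is_possible_to_get_seats (n : Int) (m : Int) (seats : List Int) (out : Bool) : Prop := out = is_possible_to_get_seats_alt n m seats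
instance (n : Int) (m : Int) (seats : List Int) (out : Bool) : Decidable (Spec_is_possible_to_get_seats n m seats out) := by unfold Spec_is_possible_to_get_seats; infer_instance

-- ===== CLAIM (what is proved, stated in full; the proofs are below) =====
def Claim_equal_is_possible_to_get_seats : Prop := ∀ (n : Int) (m : Int) (seats : List Int), Dom_is_possible_to_get_seats n m seats → Pre_is_possible_to_get_seats n m seats → Spec_is_possible_to_get_seats n m seats (is_possible_to_get_seats n m seats)

-- ===== LEMMAS AND PROOFS =====

-- greedy selection over the window-mark list; characterises A's loop result
def greedy : List Bool → Int
  | [] => 0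
  | false :: g => greedy g
  | true :: [] => 1
  | true :: _ :: g => 1 + greedy g

-- remaining total of B's run-length loop, given the current run length r
def hRun : Int → List Bool → Int
  | r, [] => PySem.Int.floordiv (r + 1) 2
  | r, true :: g => hRun (r + 1) g
  | r, false :: g => PySem.Int.floordiv (r + 1) 2 + hRun 0 g

theorem fold_eq (g : List Bool) : ∀ (t r : Int),
    (((g.foldl bStep (t, r)).1) + PySem.Int.floordiv ((g.foldl bStep (t, r)).2 + 1) 2)
      = t + hRun r g := by
  induction g with
  | nil => intro t r; simp [hRun]
  | cons b g ih =>
    intro t r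
    cases b
    · simp only [List.foldl_cons, bStep, hRun]
      rw [ih (t + PySem.Int.floordiv (r + 1) 2) 0]
      ring
    · simp only [List.foldl_cons, bStep, hRun]
      exact ih t (r + 1)

theorem hRun_add_two (g : List Bool) : ∀ (r : Int), 0 ≤ r → hRun (r + 2) g = 1 + hRun r g := by
  induction g with
  | nil =>
    intro r hr
    simp only [hRun]
    rw [PySem.Int.floordiv_eq_ediv_of_pos (by omega), PySem.Int.floordiv_eq_ediv_of_pos (by omega)]
    omega
  | cons b g ih =>
    intro r hr
    cases b
    · simp only [hRun]
      rw [PySem.Int.floordiv_eq_ediv_of_pos (by omega), PySem.Int.floordiv_eq_ediv_of_pos (by omega)]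
      omega
    · have := ih (r + 1) (by omega)
      simp only [hRun]
      rw [show r + 2 + 1 = (r + 1) + 2 by ring, this]

theorem hRun_zero (g : List Bool) : hRun 0 g = greedy g := by
  induction g using greedy.induct with
  | case1 => decide
  | case2 g ih =>
    simp only [hRun, greedy, ih]
    rw [show PySem.Int.floordiv (0 + 1) 2 = (0 : Int) from by decide]
    ring
  | case3 => decide
  | case4 b g ih =>
    cases b
    · simp only [hRun, greedy, ih]
      rw [show PySem.Int.floordiv (0 + 1 + 1) 2 = (1 : Int) from by decide]
    · simp only [hRun, greedy, ← ih]
      rw [show (0 : Int) + 1 + 1 = 0 + 2 by ring, hRun_add_two g 0 le_rfl]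

theorem length_zipWith3 {α β γ δ : Type} (f : α → β → γ → δ) :
    ∀ (as : List α) (bs : List β) (cs : List γ),
      (List.zipWith3 f as bs cs).length = min as.length (min bs.length cs.length) := by
  intro as
  induction as with
  | nil => intro bs cs; simp [List.zipWith3]
  | cons a as ih =>
    intro bs cs
    cases bs <;> cases cs <;> simp [List.zipWith3, ih]

theorem getElem_zipWith3 {α β γ δ : Type} (f : α → β → γ → δ) :
    ∀ (as : List α) (bs : List β) (cs : List γ) (j : Nat)
      (h1 : j < as.length) (h2 : j < bs.length) (h3 : j < cs.length)
      (h : j < (List.zipWith3 f as bs cs).length),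
      (List.zipWith3 f as bs cs)[j] = f as[j] bs[j] cs[j] := by
  intro as
  induction as with
  | nil => intro bs cs j h1; simp at h1
  | cons a as ih =>
    intro bs cs j h1 h2 h3 h
    cases bs with
    | nil => simp at h2
    | cons b bs =>
      cases cs with
      | nil => simp at h3
      | cons c cs =>
        cases j with
        | zero => simp [List.zipWith3]
        | succ j =>
          simp only [List.zipWith3, List.getElem_cons_succ]
          exact ih bs cs j (by simpa using h1) (by simpa using h2) (by simpa using h3)
            (by simpa [List.zipWith3] using h)

theorem goodList_length (s : List Int) : (goodList s).length = s.length := by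
  cases s with
  | nil => simp [goodList, List.zipWith3]
  | cons a s => simp [goodList, length_zipWith3]

theorem goodList_get (s : List Int) (j : Nat) (hj : j < s.length)
    (h : j < (goodList s).length) :
    (goodList s)[j] =
      decide ((if j = 0 then 0 else s.getD (j - 1) 0) + s.getD j 0
        + (if j = s.length - 1 then 0 else s.getD (j + 1) 0) = 0) := by
  have htl : (s.tail ++ [(0 : Int)]).length = s.length := by
    cases s with
    | nil => simp at hj
    | cons a t => simp
  have hA : ∀ (hh : j < (0 :: s).length),
      (0 :: s)[j] = (if j = 0 then 0 else s.getD (j - 1) 0) := by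
    intro hh
    cases j with
    | zero => simp
    | succ jj =>
      rw [List.getElem_cons_succ, if_neg (Nat.succ_ne_zero jj),
        List.getD_eq_getElem _ _ (by omega)]
      simp
  have hB : s[j] = s.getD j 0 := (List.getD_eq_getElem _ _ hj).symm
  have hC : ∀ (hh : j < (s.tail ++ [(0 : Int)]).length),
      (s.tail ++ [(0 : Int)])[j] = (if j = s.length - 1 then 0 else s.getD (j + 1) 0) := by
    intro hh
    by_cases hlast : j = s.length - 1
    · rw [if_pos hlast]
      have hj' : j = s.tail.length := by
        cases s with
        | nil => simp at hj
        | cons a t => simp only [List.length_cons, List.tail_cons] at hlast ⊢; omega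
      rw [List.getElem_append_right (by omega)]
      simp [hj']
    · rw [if_neg hlast]
      have hjt : j < s.tail.length := by
        cases s with
        | nil => simp at hj
        | cons a t => simp only [List.length_cons, List.tail_cons] at hj hlast ⊢; omega
      rw [List.getElem_append_left hjt, List.getElem_tail,
        List.getD_eq_getElem _ _ (by omega)]
  simp only [goodList]
  rw [getElem_zipWith3 _ _ _ _ j (by simp; omega) hj (by omega)
    (by simpa [goodList] using h)]
  rw [hA (by simp; omega), hB, hC (by omega)]

-- A's loop condition at index i equals the j-th window mark of B
theorem cond_eq (seats : List Int) (m i : Int) (hm : m ≤ (seats.length : Int))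
    (h0 : 0 ≤ i) (him : i < m)
    (h : i.toNat < (goodList (seats.take (max m 0).toNat)).length) :
    (goodList (seats.take (max m 0).toNat))[i.toNat] =
      decide ((if i = 0 then 0 else pvGetD seats (i - 1))
        + (if i = m - 1 then 0 else pvGetD seats (i + 1)) + pvGetD seats i = 0) := by
  have hsl : (seats.take (max m 0).toNat).length = (max m 0).toNat := by
    rw [List.length_take]; omega
  have hget : ∀ (k : Nat), k < (max m 0).toNat →
      (seats.take (max m 0).toNat).getD k 0 = pvGetD seats (k : Int) := by
    intro k hk
    rw [pvGetD, PySem.List.pyGetD_eq_getElem seats 0 (by omega) (by omega),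
      List.getD_eq_getElem _ _ (by omega)]
    simp [List.getElem_take]
  rw [goodList_get _ _ (by omega) h]
  have e1 : (if i.toNat = 0 then 0 else (seats.take (max m 0).toNat).getD (i.toNat - 1) 0)
      = (if i = 0 then 0 else pvGetD seats (i - 1)) := by
    by_cases h0' : i = 0
    · simp [h0']
    · rw [if_neg (by omega), if_neg h0', hget _ (by omega)]
      congr 1; omega
  have e2 : (if i.toNat = (seats.take (max m 0).toNat).length - 1 then 0
        else (seats.take (max m 0).toNat).getD (i.toNat + 1) 0)
      = (if i = m - 1 then 0 else pvGetD seats (i + 1)) := by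
    by_cases hl : i = m - 1
    · rw [if_pos (by omega), if_pos hl]
    · rw [if_neg (by omega), if_neg hl, hget _ (by omega)]
      congr 1; omega
  have e3 : (seats.take (max m 0).toNat).getD i.toNat 0 = pvGetD seats i := by
    rw [hget _ (by omega)]; congr 1; omega
  rw [e1, e2, e3, decide_eq_decide]
  constructor <;> intro hh <;> linarith

theorem aLoop_eq (seats : List Int) (m : Int) (hm : m ≤ (seats.length : Int)) :
    ∀ (k : Nat) (i avail : Int), (m - i).toNat ≤ k → 0 ≤ i →
      aLoop m seats avail i
        = avail + greedy ((goodList (seats.take (max m 0).toNat)).drop i.toNat) := by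
  have hsl : (seats.take (max m 0).toNat).length = (max m 0).toNat := by
    rw [List.length_take]; omega
  have hgl : (goodList (seats.take (max m 0).toNat)).length = (max m 0).toNat := by
    rw [goodList_length, hsl]
  intro k
  induction k with
  | zero =>
    intro i avail hk hi0
    have hnot : ¬ i < m := by omega
    rw [aLoop, dif_neg hnot, List.drop_eq_nil_of_le (by omega)]
    simp [greedy]
  | succ k ih =>
    intro i avail hk hi0
    by_cases hi : i < m
    · rw [aLoop, dif_pos hi]
      have hjg : i.toNat < (goodList (seats.take (max m 0).toNat)).length := by omega
      have hdrop : (goodList (seats.take (max m 0).toNat)).drop i.toNat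
          = (goodList (seats.take (max m 0).toNat))[i.toNat]
            :: (goodList (seats.take (max m 0).toNat)).drop (i.toNat + 1) :=
        List.drop_eq_getElem_cons hjg
      rw [hdrop, cond_eq seats m i hm hi0 hi hjg]
      by_cases hc : (if i = 0 then 0 else pvGetD seats (i - 1))
          + (if i = m - 1 then 0 else pvGetD seats (i + 1)) + pvGetD seats i = 0
      · rw [if_pos hc, decide_eq_true hc]
        have ih2 := ih (i + 2) (avail + 1) (by omega) (by omega)
        have h2n : (i + 2).toNat = i.toNat + 2 := by omega
        rw [ih2, h2n]
        have hdd : (goodList (seats.take (max m 0).toNat)).drop (i.toNat + 2)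
            = ((goodList (seats.take (max m 0).toNat)).drop (i.toNat + 1)).drop 1 := by
          rw [List.drop_drop]
        cases hrest : (goodList (seats.take (max m 0).toNat)).drop (i.toNat + 1) with
        | nil => rw [hdd, hrest]; simp [greedy]
        | cons x g' => rw [hdd, hrest]; simp only [List.drop_one, List.tail_cons, greedy]; ring
      · rw [if_neg hc, decide_eq_false hc]
        have ih1 := ih (i + 1) avail (by omega) (by omega)
        have h1n : (i + 1).toNat = i.toNat + 1 := by omega
        rw [ih1, h1n, greedy]
    · rw [aLoop, dif_neg hi, List.drop_eq_nil_of_le (by omega)]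
      simp [greedy]

-- ===== VERDICT (by name: the statement is the Claim_ definition above) =====
theorem is_possible_to_get_seats_spec : Claim_equal_is_possible_to_get_seats := by
  intro n m seats _ hpre
  unfold Spec_is_possible_to_get_seats
  have h1 : aLoop m seats 0 0 = greedy (goodList (seats.take (max m 0).toNat)) := by
    have := aLoop_eq seats m hpre (m - 0).toNat 0 0 le_rfl le_rfl
    simpa using this
  have h2 : ((goodList (seats.take (max m 0).toNat)).foldl bStep (0, 0)).1
      + PySem.Int.floordiv (((goodList (seats.take (max m 0).toNat)).foldl bStep (0, 0)).2 + 1) 2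
      = greedy (goodList (seats.take (max m 0).toNat)) := by
    rw [fold_eq, hRun_zero, zero_add]
  show decide (n ≤ aLoop m seats 0 0) = _
  rw [h1]
  show _ = decide (n ≤ ((goodList (seats.take (max m 0).toNat)).foldl bStep (0, 0)).1
    + PySem.Int.floordiv (((goodList (seats.take (max m 0).toNat)).foldl bStep (0, 0)).2 + 1) 2)
  rw [h2]
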